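-- pv_equiv track=rewrite | github.com/Saurabh1Barasiya/DSA-advanced | binary search/21_Eko_Eko_spoj.py | solve
-- ===== SOURCE A (Python) =====
-- def is_solution_possible(trees,mid,m):
--     sum_ = 0
--     for tree in trees:
--         if tree - mid <= 0:
--             sum_ += 0
--         else:
--             sum_ += (tree - mid)
--     if sum_ >= m:
--         return True
--     else:
--         return False
--
-- def solve(trees,m,n):
--     # make a search space.
--
--     start = 0
--     end = max(trees) # maximum value of a tree array.
--
--     collected_wood = 0
--     while start <= end:
--         mid = start + (end - start) // 2
--         if is_solution_possible(trees,mid,m):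
--             collected_wood = mid
--             start = mid + 1
--         else:
--             end = mid - 1
--     return collected_wood
-- ===== SOURCE B (Python) =====
-- def solve(trees, m, n):
--     ts = sorted(trees, reverse=True)
--     hi = ts[0]
--     if hi < 0:
--         return 0
--     if m <= 0:
--         return hi
--     nexts = ts[1:] + [0]
--     k = 0
--     P = 0
--     for t, low in zip(ts, nexts):
--         k += 1
--         P += t
--         if low < 0:
--             low = 0
--         cand = (P - m) // k
--         top = t - 1
--         if top < cand:
--             cand = top
--         if cand >= low:
--             return cand
--     return 0
-- ===== Notes on version B (the rewrite author's own statement) =====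
-- stated objective: faster
-- what changed: Replaces A's binary search over cutting heights (each probe rescanning all trees) by one descending sort plus a single prefix-sum sweep that finds the segment where the wood threshold is crossed and computes the optimal height by floor division.
-- outside the precondition, e.g. on solve([], 1, 0): A raises ValueError, B raises IndexError
import Mathlib
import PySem

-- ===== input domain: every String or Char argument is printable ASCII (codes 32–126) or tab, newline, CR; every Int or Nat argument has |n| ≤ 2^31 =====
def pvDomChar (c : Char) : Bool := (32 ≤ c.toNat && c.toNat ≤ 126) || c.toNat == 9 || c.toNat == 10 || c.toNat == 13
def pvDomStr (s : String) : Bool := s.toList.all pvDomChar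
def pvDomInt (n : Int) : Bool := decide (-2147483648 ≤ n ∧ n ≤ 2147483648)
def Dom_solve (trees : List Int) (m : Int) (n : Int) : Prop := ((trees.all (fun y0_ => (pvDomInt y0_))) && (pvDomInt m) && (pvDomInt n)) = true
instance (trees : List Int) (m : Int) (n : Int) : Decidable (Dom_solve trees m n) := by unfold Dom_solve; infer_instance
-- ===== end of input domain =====

-- B replaces A's binary search over cutting heights (each probe an O(n) wood-sum scan) by one
-- descending sort plus a single prefix-sum sweep that computes the answer arithmetically inside
-- the segment where the wood threshold is crossed (objective: faster).

-- ===== PORT A =====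
-- literal transliteration of is_solution_possible (its running sum is the helper cutSum)
def cutSum (trees : List Int) (mid : Int) : Int :=
  trees.foldl (fun sum_ tree => if tree - mid ≤ 0 then sum_ + 0 else sum_ + (tree - mid)) 0

def isSolutionPossible (trees : List Int) (mid : Int) (m : Int) : Bool :=
  if cutSum trees mid ≥ m then true else false

-- the while loop; fuel only makes the same computation total (the interval length shrinks by
-- at least 1 per iteration, and every call below supplies fuel > end - start + 1)
def solveLoop (trees : List Int) (m : Int) (fuel : Nat) (start end_ collected : Int) : Int :=
  match fuel with
  | 0 => collected
  | fuel' + 1 =>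
    if start ≤ end_ then
      let mid := start + PySem.Int.floordiv (end_ - start) 2
      if isSolutionPossible trees mid m then
        solveLoop trees m fuel' (mid + 1) end_ mid
      else
        solveLoop trees m fuel' start (mid - 1) collected
    else collected

def solve (trees : List Int) (m : Int) (n : Int) : Int :=
  match PySem.List.max? trees (fun x => x) with
  | none => 0   -- Python max([]) raises ValueError: excluded by Pre_solve
  | some end_ => solveLoop trees m ((end_ + 1).toNat + 1) 0 end_ 0

-- ===== PORT B =====
-- literal transliteration of Source B's 'for t, low in zip(ts, nexts)' loop with early return
def altLoop (pairs : List (Int × Int)) (m : Int) (k P : Int) : Int :=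
  match pairs with
  | [] => 0
  | (t, low0) :: rest =>
    let k' := k + 1
    let P' := P + t
    let low := if low0 < 0 then 0 else low0
    let cand := PySem.Int.floordiv (P' - m) k'
    let top := t - 1
    let cand' := if top < cand then top else cand
    if cand' ≥ low then cand' else altLoop rest m k' P'

def solve_alt (trees : List Int) (m : Int) (n : Int) : Int :=
  let ts := PySem.List.sorted trees (fun x => x) true
  let hi := ts.getD 0 0   -- ts[0]; on trees = [] Python raises IndexError (excluded by Pre_solve)
  if hi < 0 then 0
  else if m ≤ 0 then hi
  else
    let nexts := PySem.List.slice ts (some 1) none ++ [0]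
    altLoop (ts.zip nexts) m 0 0

-- ===== PRECONDITION & SPEC =====
-- Pre_ excludes only the empty list, on which A raises ValueError (max of empty sequence)
-- and B raises IndexError.
def Pre_solve (trees : List Int) (m : Int) (n : Int) : Prop := trees ≠ []
instance (trees : List Int) (m : Int) (n : Int) : Decidable (Pre_solve trees m n) := by
  unfold Pre_solve; infer_instance

def pvWitness_solve : List Int × Int × Int := ([3, 1, 2], 4, 3)

def Spec_solve (trees : List Int) (m : Int) (n : Int) (out : Int) : Prop := out = solve_alt trees m n
instance (trees : List Int) (m : Int) (n : Int) (out : Int) : Decidable (Spec_solve trees m n out) := by unfold Spec_solve; infer_instance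

-- ===== CLAIM (what is proved, stated in full; the proofs are below) =====
def Claim_equal_solve : Prop := ∀ (trees : List Int) (m : Int) (n : Int), Dom_solve trees m n → Pre_solve trees m n → Spec_solve trees m n (solve trees m n)

-- ===== LEMMAS AND PROOFS =====

-- the quantity both programs reason about: feasibility of a cutting height h
def Feas (trees : List Int) (m h : Int) : Prop := m ≤ cutSum trees h

-- what both programs return: the greatest feasible height in [lo, hi], or the fallback c if none
def CharRes (trees : List Int) (m lo hi c r : Int) : Prop :=
  (r = c ∧ ∀ h, lo ≤ h → h ≤ hi → ¬ Feas trees m h) ∨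
  (lo ≤ r ∧ r ≤ hi ∧ Feas trees m r ∧ ∀ h, r < h → h ≤ hi → ¬ Feas trees m h)

lemma altLoop_cons (t low0 : Int) (rest : List (Int × Int)) (m k P : Int) :
    altLoop ((t, low0) :: rest) m k P =
      (if (if t - 1 < PySem.Int.floordiv (P + t - m) (k + 1) then t - 1
           else PySem.Int.floordiv (P + t - m) (k + 1)) ≥ (if low0 < 0 then 0 else low0)
       then (if t - 1 < PySem.Int.floordiv (P + t - m) (k + 1) then t - 1
             else PySem.Int.floordiv (P + t - m) (k + 1))
       else altLoop rest m (k + 1) (P + t)) := rfl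

lemma cutSum_eq_sum (trees : List Int) (h : Int) :
    cutSum trees h = (trees.map (fun t => max (t - h) 0)).sum := by
  have hfun : (fun (sum_ tree : Int) => if tree - h ≤ 0 then sum_ + 0 else sum_ + (tree - h))
      = fun acc t => acc + max (t - h) 0 := by
    funext s t; by_cases ht : t - h ≤ 0 <;> simp [ht] <;> omega
  unfold cutSum
  rw [hfun, PySem.List.foldl_add trees (fun t => max (t - h) 0) 0, zero_add]

lemma cutSum_perm {ts trees : List Int} (hp : ts.Perm trees) (h : Int) :
    cutSum ts h = cutSum trees h := by
  rw [cutSum_eq_sum, cutSum_eq_sum]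
  exact (hp.map _).sum_eq

lemma cutSum_antitone (trees : List Int) {h h' : Int} (hh : h ≤ h') :
    cutSum trees h' ≤ cutSum trees h := by
  rw [cutSum_eq_sum, cutSum_eq_sum]
  exact List.sum_le_sum (fun i _ => by omega)

lemma cutSum_zero_of_le (trees : List Int) (h : Int) (hle : ∀ x ∈ trees, x ≤ h) :
    cutSum trees h = 0 := by
  rw [cutSum_eq_sum]
  have : trees.map (fun t => max (t - h) 0) = trees.map (fun _ => (0 : Int)) :=
    List.map_congr_left (fun x hx => by have := hle x hx; omega)
  rw [this]
  simp

lemma cutSum_segment (ts : List Int) (k : Nat) (h : Int) (hk : k ≤ ts.length)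
    (h1 : ∀ x ∈ ts.take k, h < x) (h2 : ∀ x ∈ ts.drop k, x ≤ h) :
    cutSum ts h = (ts.take k).sum - (k : Int) * h := by
  rw [cutSum_eq_sum]
  conv_lhs => rw [← List.take_append_drop k ts]
  rw [List.map_append, List.sum_append]
  have e1 : (ts.take k).map (fun t => max (t - h) 0) = (ts.take k).map (fun t => t + (-h)) :=
    List.map_congr_left (fun x hx => by have := h1 x hx; omega)
  have e2 : (ts.drop k).map (fun t => max (t - h) 0) = (ts.drop k).map (fun _ => (0 : Int)) :=
    List.map_congr_left (fun x hx => by have := h2 x hx; omega)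
  rw [e1, e2, PySem.List.sum_map_add_int (ts.take k) (fun t => t) (fun _ => -h),
    PySem.List.sum_map_const_int, PySem.List.sum_map_const_int]
  have hlt : (ts.take k).length = k := by simp [List.length_take]; omega
  rw [hlt]
  simp [List.map_id']
  ring

lemma charRes_unique {trees : List Int} {m lo hi c r r' : Int}
    (h1 : CharRes trees m lo hi c r) (h2 : CharRes trees m lo hi c r') : r = r' := by
  rcases h1 with ⟨he1, hn⟩ | ⟨hlo, hhi, hF, hab⟩
  · rcases h2 with ⟨he2, _⟩ | ⟨hlo', hhi', hF', _⟩
    · rw [he1, he2]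
    · exact absurd hF' (hn r' hlo' hhi')
  · rcases h2 with ⟨he2, hn'⟩ | ⟨hlo', hhi', hF', hab'⟩
    · exact absurd hF (hn' r hlo hhi)
    · by_contra hne
      rcases lt_or_gt_of_ne hne with hlt | hgt
      · exact absurd hF' (hab r' hlt hhi')
      · exact absurd hF (hab' r hgt hhi)

lemma isSolutionPossible_iff (trees : List Int) (mid m : Int) :
    isSolutionPossible trees mid m = true ↔ Feas trees m mid := by
  by_cases hc : m ≤ cutSum trees mid <;>
    simp [isSolutionPossible, Feas, ge_iff_le, hc]

lemma solveLoop_char (trees : List Int) (m : Int) :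
    ∀ (fuel : Nat) (start end_ c : Int), (end_ + 1 - start).toNat < fuel →
      CharRes trees m start end_ c (solveLoop trees m fuel start end_ c) := by
  intro fuel
  induction fuel with
  | zero =>
    intro start end_ c hf
    exact absurd hf (Nat.not_lt_zero _)
  | succ f ih =>
    intro start end_ c hf
    by_cases hse : start ≤ end_
    · have hfd : PySem.Int.floordiv (end_ - start) 2 = (end_ - start) / 2 :=
        PySem.Int.floordiv_eq_ediv_of_pos (by omega)
      have hunf : solveLoop trees m (f + 1) start end_ c =
          (if isSolutionPossible trees (start + PySem.Int.floordiv (end_ - start) 2) m then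
            solveLoop trees m f (start + PySem.Int.floordiv (end_ - start) 2 + 1) end_
              (start + PySem.Int.floordiv (end_ - start) 2)
          else
            solveLoop trees m f start (start + PySem.Int.floordiv (end_ - start) 2 - 1) c) := by
        simp only [solveLoop, if_pos hse]
      set mid := start + PySem.Int.floordiv (end_ - start) 2 with hmid
      have hmb : start ≤ mid ∧ mid ≤ end_ := by rw [hmid, hfd]; omega
      rw [hunf]
      by_cases hposs : isSolutionPossible trees mid m = true
      · rw [if_pos hposs]
        have hFmid : Feas trees m mid := (isSolutionPossible_iff trees mid m).mp hposs
        rcases ih (mid + 1) end_ mid (by omega) with ⟨hre, hnone⟩ | ⟨h1, h2, h3, h4⟩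
        · right; rw [hre]
          exact ⟨hmb.1, hmb.2, hFmid, fun h hh1 hh2 => hnone h (by omega) hh2⟩
        · right; exact ⟨by omega, h2, h3, h4⟩
      · rw [if_neg hposs]
        have hNF : ¬ Feas trees m mid :=
          fun hF => hposs ((isSolutionPossible_iff trees mid m).mpr hF)
        have hup : ∀ h, mid ≤ h → ¬ Feas trees m h := by
          intro h hh hF
          have := cutSum_antitone trees hh
          unfold Feas at *
          omega
        rcases ih start (mid - 1) c (by omega) with ⟨hre, hnone⟩ | ⟨h1, h2, h3, h4⟩
        · left
          refine ⟨hre, fun h hh1 hh2 => ?_⟩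
          by_cases hc : h ≤ mid - 1
          · exact hnone h hh1 hc
          · exact hup h (by omega)
        · right
          refine ⟨h1, by omega, h3, fun h hh1 hh2 => ?_⟩
          by_cases hc : h ≤ mid - 1
          · exact h4 h hh1 hc
          · exact hup h (by omega)
    · have hunf : solveLoop trees m (f + 1) start end_ c = c := by
        simp only [solveLoop, if_neg hse]
      rw [hunf]
      exact Or.inl ⟨rfl, fun h h1 h2 _ => absurd (le_trans h1 h2) hse⟩

-- descending-sorted index monotonicity
lemma desc_getElem {ts : List Int} (hs : ts.Pairwise (fun a b => b ≤ a))
    {i j : Nat} (hij : i ≤ j) (hj : j < ts.length) : ts[j] ≤ ts[i]'(by omega) := by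
  rcases Nat.eq_or_lt_of_le hij with h | h
  · subst h; exact le_refl _
  · exact List.pairwise_iff_getElem.mp hs i j (by omega) hj h

lemma take_lower {ts : List Int} (hs : ts.Pairwise (fun a b => b ≤ a)) {k : Nat}
    (hk1 : 1 ≤ k) (hk : k ≤ ts.length) :
    ∀ x ∈ ts.take k, ts.getD (k - 1) 0 ≤ x := by
  intro x hx
  rw [List.mem_iff_getElem] at hx
  obtain ⟨i, hi, rfl⟩ := hx
  have hil : i < k := by simp [List.length_take] at hi; omega
  rw [List.getElem_take, List.getD_eq_getElem ts 0 (by omega)]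
  exact desc_getElem hs (by omega) (by omega)

lemma drop_upper {ts : List Int} (hs : ts.Pairwise (fun a b => b ≤ a)) {k : Nat}
    (hk : k < ts.length) : ∀ x ∈ ts.drop k, x ≤ ts.getD k 0 := by
  intro x hx
  rw [List.mem_iff_getElem] at hx
  obtain ⟨j, hj, rfl⟩ := hx
  have hjl : k + j < ts.length := by simp [List.length_drop] at hj; omega
  rw [List.getElem_drop, List.getD_eq_getElem ts 0 hk]
  exact desc_getElem hs (Nat.le_add_right k j) hjl

lemma altLoop_char (ts trees : List Int) (m : Int) (hp : ts.Perm trees)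
    (hs : ts.Pairwise (fun a b => b ≤ a)) (hne : ts ≠ []) :
    ∀ (fuel j : Nat), ts.length - j ≤ fuel → j ≤ ts.length →
      (∀ h : Int, (if j < ts.length then max (ts.getD j 0) 0 else 0) ≤ h →
        h ≤ ts.getD 0 0 → ¬ Feas trees m h) →
      CharRes trees m 0 (ts.getD 0 0) 0
        (altLoop ((ts.zip (ts.drop 1 ++ [0])).drop j) m (j : Int) ((ts.take j).sum)) := by
  have hlen : 0 < ts.length := by
    cases ts with
    | nil => exact absurd rfl hne
    | cons a t => simp
  have hnl : (ts.drop 1 ++ ([0] : List Int)).length = ts.length := by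
    simp [List.length_drop]; omega
  have hziplen : (ts.zip (ts.drop 1 ++ [0])).length = ts.length := by
    rw [List.length_zip, hnl, Nat.min_self]
  intro fuel
  induction fuel with
  | zero =>
    intro j hf hj hinv
    have hje : ¬ j < ts.length := by omega
    have hdrop : (ts.zip (ts.drop 1 ++ [0])).drop j = [] := by
      rw [List.drop_eq_nil_iff]
      omega
    rw [hdrop]
    refine Or.inl ⟨rfl, fun h h0 hh => hinv h ?_ hh⟩
    rw [if_neg hje]; exact h0
  | succ f ih =>
    intro j hf hj hinv
    by_cases hjl : j < ts.length
    · have hgd : ts.getD j 0 = ts[j] := List.getD_eq_getElem ts 0 hjl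
      have hhiE : ts.getD 0 0 = ts[0] := List.getD_eq_getElem ts 0 hlen
      have hjhi : ts[j] ≤ ts.getD 0 0 := by
        rw [hhiE]; exact desc_getElem hs (Nat.zero_le _) hjl
      have hjz : j < (ts.zip (ts.drop 1 ++ [0])).length := by omega
      have hnj : j < (ts.drop 1 ++ ([0] : List Int)).length := by omega
      have hnextv : (ts.drop 1 ++ ([0] : List Int))[j]'hnj =
          (if j + 1 < ts.length then ts.getD (j + 1) 0 else 0) := by
        by_cases hj1 : j + 1 < ts.length
        · rw [if_pos hj1]
          have hdl : j < (ts.drop 1).length := by simp [List.length_drop]; omega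
          rw [List.getElem_append_left hdl, List.getElem_drop,
            List.getD_eq_getElem ts 0 (by omega)]
          congr 1
          omega
        · rw [if_neg hj1]
          have hdl : (ts.drop 1).length ≤ j := by simp [List.length_drop]; omega
          rw [List.getElem_append_right hdl]
          simp
      have hdrop : (ts.zip (ts.drop 1 ++ [0])).drop j =
          (ts[j], (if j + 1 < ts.length then ts.getD (j + 1) 0 else 0))
            :: (ts.zip (ts.drop 1 ++ [0])).drop (j + 1) := by
        rw [List.drop_eq_getElem_cons hjz]
        congr 1
        rw [List.getElem_zip, hnextv]
      have hsum : (ts.take (j + 1)).sum = (ts.take j).sum + ts[j] := by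
        have := List.sum_take_succ ts j hjl
        simpa using this
      rw [hdrop, altLoop_cons]
      set tj := ts[j] with htj
      set lw0 : Int := if j + 1 < ts.length then ts.getD (j + 1) 0 else 0 with hlw0
      set S := (ts.take j).sum with hS
      set low : Int := if lw0 < 0 then 0 else lw0 with hlow
      set cand := PySem.Int.floordiv (S + tj - m) ((j : Int) + 1) with hcand
      set cand' := if tj - 1 < cand then tj - 1 else cand with hcand'
      have hlow_nonneg : 0 ≤ low := by rw [hlow]; split <;> omega
      have hcand'_le : cand' ≤ tj - 1 ∧ cand' ≤ cand := by
        constructor <;> (rw [hcand']; split <;> omega)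
      have hseg : ∀ h : Int, low ≤ h → h ≤ tj - 1 →
          cutSum trees h = S + tj - ((j : Int) + 1) * h := by
        intro h hl hu
        rw [← cutSum_perm hp h]
        have := cutSum_segment ts (j + 1) h (by omega)
          (by
            intro x hx
            have := take_lower hs (by omega) (by omega : j + 1 ≤ ts.length) x hx
            simp only [Nat.add_sub_cancel] at this
            rw [hgd] at this
            omega)
          (by
            intro x hx
            by_cases hj1 : j + 1 < ts.length
            · have hxle := drop_upper hs hj1 x hx
              have he : lw0 = ts.getD (j + 1) 0 := by rw [hlw0, if_pos hj1]
              have hlow0le : lw0 ≤ low := by rw [hlow]; split <;> omega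
              omega
            · have hd : ts.drop (j + 1) = [] := by
                rw [List.drop_eq_nil_iff]; omega
              rw [hd] at hx
              simp at hx)
        rw [this, ← hsum]
        push_cast
        ring_nf
      have hfeas_seg : ∀ h : Int, low ≤ h → h ≤ tj - 1 → (Feas trees m h ↔ h ≤ cand) := by
        intro h hl hu
        unfold Feas
        rw [hseg h hl hu, hcand,
          PySem.Int.le_floordiv_iff_mul_le (by omega : (0 : Int) < (j : Int) + 1),
          mul_comm h ((j : Int) + 1)]
        constructor <;> intro <;> linarith
      have htop_infeas : ∀ h : Int, tj ≤ h → 0 ≤ h → h ≤ ts.getD 0 0 → ¬ Feas trees m h := by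
        intro h h1 h0 h2
        refine hinv h ?_ h2
        rw [if_pos hjl]
        omega
      by_cases hret : cand' ≥ low
      · rw [if_pos hret]
        right
        have hfc : Feas trees m cand' := (hfeas_seg cand' hret hcand'_le.1).mpr hcand'_le.2
        refine ⟨by omega, by omega, hfc, ?_⟩
        intro h hgt hle hF
        by_cases hcase : h ≤ tj - 1
        · have hlc := (hfeas_seg h (by omega) hcase).mp hF
          have : h ≤ cand' := by rw [hcand']; split <;> omega
          omega
        · exact htop_infeas h (by omega) (by omega) hle hF
      · rw [if_neg hret]
        have hinv' : ∀ h : Int,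
            (if j + 1 < ts.length then max (ts.getD (j + 1) 0) 0 else 0) ≤ h →
            h ≤ ts.getD 0 0 → ¬ Feas trees m h := by
          intro h hB hle hF
          have hBlow : low ≤ h := by
            by_cases hj1 : j + 1 < ts.length
            · rw [if_pos hj1] at hB
              rw [hlow, hlw0, if_pos hj1]
              split <;> omega
            · rw [if_neg hj1] at hB
              rw [hlow, hlw0, if_neg hj1]
              split <;> omega
          by_cases hcase : h ≤ tj - 1
          · have hlc := (hfeas_seg h hBlow hcase).mp hF
            have : h ≤ cand' := by rw [hcand']; split <;> omega
            omega
          · exact htop_infeas h (by omega) (by omega) hle hF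
        have hcast : (j : Int) + 1 = ((j + 1 : Nat) : Int) := by push_cast; ring
        rw [hcast, show S + tj = (ts.take (j + 1)).sum from by rw [hsum]]
        exact ih (j + 1) (by omega) (by omega) hinv'
    · have hdrop : (ts.zip (ts.drop 1 ++ [0])).drop j = [] := by
        rw [List.drop_eq_nil_iff]
        omega
      rw [hdrop]
      refine Or.inl ⟨rfl, fun h h0 hh => hinv h ?_ hh⟩
      rw [if_neg hjl]; exact h0

-- ===== VERDICT (by name: the statement is the Claim_ definition above) =====
theorem solve_spec : Claim_equal_solve := by
  intro trees m n hdom hpre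
  unfold Pre_solve at hpre
  unfold Spec_solve
  obtain ⟨mx, hmx⟩ : ∃ mx, PySem.List.max? trees (fun x => x) = some mx := by
    cases hmax : PySem.List.max? trees (fun x => x) with
    | none => exact absurd ((PySem.List.max?_eq_none_iff _ _).mp hmax) hpre
    | some mx => exact ⟨mx, rfl⟩
  have hA : CharRes trees m 0 mx 0 (solve trees m n) := by
    have hsv : solve trees m n = solveLoop trees m ((mx + 1).toNat + 1) 0 mx 0 := by
      unfold solve; rw [hmx]
    rw [hsv]
    exact solveLoop_char trees m ((mx + 1).toNat + 1) 0 mx 0 (by omega)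
  set ts := PySem.List.sorted trees (fun x => x) true with hts
  have hp : ts.Perm trees := PySem.List.sorted_perm trees (fun x => x) true
  have hsorted : ts.Pairwise (fun a b => b ≤ a) :=
    PySem.List.sorted_pairwise_rev trees (fun x => x)
  have hne : ts ≠ [] := by
    rw [hts, Ne, PySem.List.sorted_eq_nil_iff]
    exact hpre
  have hlen : 0 < ts.length := by
    cases hc : ts with
    | nil => exact absurd hc hne
    | cons a t => simp [hc]
  have hhiE : ts.getD 0 0 = ts[0] := List.getD_eq_getElem ts 0 hlen
  have hmax_ts : ∀ x ∈ ts, x ≤ ts.getD 0 0 := by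
    intro x hx
    rw [List.mem_iff_getElem] at hx
    obtain ⟨i, hi, rfl⟩ := hx
    rw [hhiE]
    exact desc_getElem hsorted (Nat.zero_le _) hi
  have hhi_mx : ts.getD 0 0 = mx := by
    have h1 : ts.getD 0 0 ≤ mx := by
      refine PySem.List.max?_isMax hmx _ ?_
      exact hp.mem_iff.mp (by rw [hhiE]; exact List.getElem_mem hlen)
    have h2 : mx ≤ ts.getD 0 0 :=
      hmax_ts mx (hp.mem_iff.mpr (PySem.List.max?_mem hmx))
    omega
  have hcut0 : cutSum trees (ts.getD 0 0) = 0 := by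
    rw [← cutSum_perm hp]
    exact cutSum_zero_of_le ts _ hmax_ts
  have hB : CharRes trees m 0 mx 0 (solve_alt trees m n) := by
    have hsv : solve_alt trees m n =
        (if ts.getD 0 0 < 0 then 0 else if m ≤ 0 then ts.getD 0 0
         else altLoop (ts.zip (PySem.List.slice ts (some 1) none ++ [0])) m 0 0) := rfl
    rw [hsv, ← hhi_mx]
    by_cases h1 : ts.getD 0 0 < 0
    · rw [if_pos h1]
      exact Or.inl ⟨rfl, fun h hh0 hhh _ => by omega⟩
    · rw [if_neg h1]
      by_cases h2 : m ≤ 0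
      · rw [if_pos h2]
        right
        refine ⟨by omega, le_refl _, ?_, fun h hgt hle _ => by omega⟩
        unfold Feas
        omega
      · rw [if_neg h2]
        have hinv0 : ∀ h : Int,
            (if 0 < ts.length then max (ts.getD 0 0) 0 else 0) ≤ h →
            h ≤ ts.getD 0 0 → ¬ Feas trees m h := by
          intro h hb hle hF
          rw [if_pos hlen] at hb
          have hhe : h = ts.getD 0 0 := by omega
          rw [hhe] at hF
          unfold Feas at hF
          omega
        have hac := altLoop_char ts trees m hp hsorted hne ts.length 0
          (by omega) (by omega) hinv0
        simp only [List.drop_zero, List.take_zero, List.sum_nil, Nat.cast_zero] at hac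
        rw [show PySem.List.slice ts (some 1) none = ts.drop 1 from by
          rw [PySem.List.slice_from_one, ← List.drop_one]]
        exact hac
  exact charRes_unique hA hB
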